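-- pv_equiv track=rewrite | github.com/Smilesasha/study_kneu_pattern_recognition_systems |  Системи розпізнавання образів та обробка зображень - Маєвський/pr_2/main.py | calc_abgh
-- ===== SOURCE A (Python) =====
-- def calc_abgh(xi, xj):
--     a = b = g = h = 0
--     for i in range(len(xi)):
--         if xi[i] == 1 and xj[i] == 1:
--             a += 1
--         elif xi[i] == 0 and xj[i] == 0:
--             b += 1
--         elif xi[i] == 1 and xj[i] == 0:
--             g += 1
--         elif xi[i] == 0 and xj[i] == 1:
--             h += 1
--     return a, b, g, h
-- ===== SOURCE B (Python) =====
-- def calc_abgh(xi, xj):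
--     pairs = list(zip(xi, xj))
--     return (pairs.count((1, 1)), pairs.count((0, 0)),
--             pairs.count((1, 0)), pairs.count((0, 1)))
-- ===== Notes on version B (the rewrite author's own statement) =====
-- stated objective: idiomatic
-- what changed: Replaces the four-counter if/elif branch-and-increment loop by zipping the two vectors once and counting each of the four coordinate pairs with list.count.
import Mathlib
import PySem

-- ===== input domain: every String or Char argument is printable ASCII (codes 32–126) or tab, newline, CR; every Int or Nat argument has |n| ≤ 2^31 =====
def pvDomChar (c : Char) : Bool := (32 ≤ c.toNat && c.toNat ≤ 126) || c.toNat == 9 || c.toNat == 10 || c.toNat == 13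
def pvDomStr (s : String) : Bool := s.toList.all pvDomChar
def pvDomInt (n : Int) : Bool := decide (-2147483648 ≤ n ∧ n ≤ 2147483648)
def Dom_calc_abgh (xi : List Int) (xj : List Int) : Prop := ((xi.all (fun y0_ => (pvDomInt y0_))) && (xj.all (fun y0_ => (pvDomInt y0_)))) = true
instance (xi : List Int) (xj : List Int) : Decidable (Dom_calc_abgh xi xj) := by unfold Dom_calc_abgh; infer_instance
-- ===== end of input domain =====

-- B replaces A's four-counter if/elif loop by zipping the two vectors and counting the four
-- coordinate pairs (idiomatic, same cost); equivalence is about the return value only.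

-- ===== PORT A =====
-- Literal port of A's indexed loop. pyGetD's default 2 is never observable inside Pre_:
-- xi's index is always in range, and xj[i] only influences a branch when xi[i] ∈ {0,1},
-- where Pre_ guarantees i < xj.length (outside that, Python A raises IndexError).
def calc_abgh (xi : List Int) (xj : List Int) : Int × Int × Int × Int :=
  (PySem.List.pyRange 0 (PySem.List.len xi) 1).foldl
    (fun s i =>
      if PySem.List.pyGetD xi i 2 = 1 ∧ PySem.List.pyGetD xj i 2 = 1 then
        (s.1 + 1, s.2.1, s.2.2.1, s.2.2.2)
      else if PySem.List.pyGetD xi i 2 = 0 ∧ PySem.List.pyGetD xj i 2 = 0 then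
        (s.1, s.2.1 + 1, s.2.2.1, s.2.2.2)
      else if PySem.List.pyGetD xi i 2 = 1 ∧ PySem.List.pyGetD xj i 2 = 0 then
        (s.1, s.2.1, s.2.2.1 + 1, s.2.2.2)
      else if PySem.List.pyGetD xi i 2 = 0 ∧ PySem.List.pyGetD xj i 2 = 1 then
        (s.1, s.2.1, s.2.2.1, s.2.2.2 + 1)
      else s)
    (0, 0, 0, 0)

-- ===== PORT B =====
def calc_abgh_alt (xi : List Int) (xj : List Int) : Int × Int × Int × Int :=
  let pairs := xi.zip xj
  ((PySem.List.count pairs (1, 1) : Int), (PySem.List.count pairs (0, 0) : Int),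
   (PySem.List.count pairs (1, 0) : Int), (PySem.List.count pairs (0, 1) : Int))

-- ===== PRECONDITION & SPEC =====
-- Pre_ is exactly the set of inputs on which Python A returns: A raises IndexError
-- precisely when some position i carrying a 0 or 1 in xi lies past the end of xj.
def Pre_calc_abgh (xi : List Int) (xj : List Int) : Prop :=
  ∀ i : Fin xi.length, (xi.get i = 0 ∨ xi.get i = 1) → (i : Nat) < xj.length
instance (xi : List Int) (xj : List Int) : Decidable (Pre_calc_abgh xi xj) := by
  unfold Pre_calc_abgh; infer_instance
def pvWitness_calc_abgh : List Int × List Int := ([1, 0, 5, 1], [1, 1, 0, 0])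

def Spec_calc_abgh (xi : List Int) (xj : List Int) (out : Int × Int × Int × Int) : Prop :=
  out = calc_abgh_alt xi xj
instance (xi : List Int) (xj : List Int) (out : Int × Int × Int × Int) :
    Decidable (Spec_calc_abgh xi xj out) := by unfold Spec_calc_abgh; infer_instance

-- ===== CLAIM =====
def Claim_equal_calc_abgh : Prop :=
  ∀ (xi : List Int) (xj : List Int), Dom_calc_abgh xi xj → Pre_calc_abgh xi xj →
    Spec_calc_abgh xi xj (calc_abgh xi xj)
-- ===== LEMMAS AND PROOFS =====

-- Appending one element on the left of a zip: it contributes a pair iff xj is long enough.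
theorem pv_zip_append_singleton {α β : Type} (ys : List α) (x : α) (xj : List β) :
    (ys ++ [x]).zip xj =
      ys.zip xj ++ (if h : ys.length < xj.length then [(x, xj[ys.length])] else []) := by
  induction ys generalizing xj with
  | nil => cases xj <;> simp
  | cons y ys ih =>
    cases xj with
    | nil => simp
    | cons z xj =>
      simp only [List.cons_append, List.zip_cons_cons, ih xj, List.length_cons]
      by_cases h : ys.length < xj.length <;> simp [h]

theorem pv_pre_prefix (ys : List Int) (x : Int) (xj : List Int)
    (h : Pre_calc_abgh (ys ++ [x]) xj) : Pre_calc_abgh ys xj := by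
  intro i hi
  have hlen : (i : Nat) < (ys ++ [x]).length := by
    simp only [List.length_append, List.length_cons, List.length_nil]
    have := i.isLt; omega
  have := h ⟨(i : Nat), hlen⟩
  simp only [List.get_eq_getElem] at this hi ⊢
  rw [List.getElem_append_left i.isLt] at this
  exact this hi

-- The loop invariant: under Pre_, running A's loop body over all indices of xi adds the
-- four pair-counts of xi.zip xj to the accumulator.
set_option maxHeartbeats 1000000 in
theorem pv_loop_eq (xi xj : List Int) (hpre : Pre_calc_abgh xi xj)
    (s : Int × Int × Int × Int) :
    (PySem.List.pyRange 0 (PySem.List.len xi) 1).foldl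
      (fun s i =>
        if PySem.List.pyGetD xi i 2 = 1 ∧ PySem.List.pyGetD xj i 2 = 1 then
          (s.1 + 1, s.2.1, s.2.2.1, s.2.2.2)
        else if PySem.List.pyGetD xi i 2 = 0 ∧ PySem.List.pyGetD xj i 2 = 0 then
          (s.1, s.2.1 + 1, s.2.2.1, s.2.2.2)
        else if PySem.List.pyGetD xi i 2 = 1 ∧ PySem.List.pyGetD xj i 2 = 0 then
          (s.1, s.2.1, s.2.2.1 + 1, s.2.2.2)
        else if PySem.List.pyGetD xi i 2 = 0 ∧ PySem.List.pyGetD xj i 2 = 1 then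
          (s.1, s.2.1, s.2.2.1, s.2.2.2 + 1)
        else s) s =
    (s.1 + ((xi.zip xj).count (1, 1) : Int),
     s.2.1 + ((xi.zip xj).count (0, 0) : Int),
     s.2.2.1 + ((xi.zip xj).count (1, 0) : Int),
     s.2.2.2 + ((xi.zip xj).count (0, 1) : Int)) := by
  induction xi using List.reverseRecOn generalizing s with
  | nil => simp
  | append_singleton ys x ih =>
    have hlen : PySem.List.len (ys ++ [x]) = (ys.length : Int) + 1 := by
      simp [PySem.List.len_eq]
    rw [hlen, PySem.List.pyRange_one_succ_right (by positivity), List.foldl_append]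
    -- over the prefix indices, (ys ++ [x]) and ys agree
    rw [PySem.List.foldl_congr_mem _ _
      (fun s i =>
        if PySem.List.pyGetD ys i 2 = 1 ∧ PySem.List.pyGetD xj i 2 = 1 then
          (s.1 + 1, s.2.1, s.2.2.1, s.2.2.2)
        else if PySem.List.pyGetD ys i 2 = 0 ∧ PySem.List.pyGetD xj i 2 = 0 then
          (s.1, s.2.1 + 1, s.2.2.1, s.2.2.2)
        else if PySem.List.pyGetD ys i 2 = 1 ∧ PySem.List.pyGetD xj i 2 = 0 then
          (s.1, s.2.1, s.2.2.1 + 1, s.2.2.2)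
        else if PySem.List.pyGetD ys i 2 = 0 ∧ PySem.List.pyGetD xj i 2 = 1 then
          (s.1, s.2.1, s.2.2.1, s.2.2.2 + 1)
        else s) s ?_]
    · have hys := pv_pre_prefix ys x xj hpre
      rw [show PySem.List.pyRange 0 (ys.length : Int) 1 =
            PySem.List.pyRange 0 (PySem.List.len ys) 1 by simp [PySem.List.len_eq]]
      rw [ih hys]
      -- last iteration, index ys.length
      have hx : PySem.List.pyGetD (ys ++ [x]) (ys.length : Int) 2 = x := by
        rw [PySem.List.pyGetD_eq_getElem _ _ (by positivity) (by simp)]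
        simp
      rw [pv_zip_append_singleton]
      by_cases hj : ys.length < xj.length
      · have hy : PySem.List.pyGetD xj (ys.length : Int) 2 = xj[ys.length] := by
          rw [PySem.List.pyGetD_eq_getElem _ _ (by positivity) (by exact_mod_cast hj)]
          simp
        simp only [dif_pos hj]
        simp only [List.foldl_cons, List.foldl_nil, hx, hy]
        split_ifs <;> simp_all <;> omega
      · -- no zip contribution; Pre_ forces x ∉ {0,1}, so the body is the identity
        have hxv : ¬ (x = 0 ∨ x = 1) := by
          intro hor
          have hlt : ys.length < (ys ++ [x]).length := by simp
          have := hpre ⟨ys.length, hlt⟩ (by simpa using hor)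
          simp at this; omega
        have hx0 : x ≠ 0 := fun h => hxv (Or.inl h)
        have hx1 : x ≠ 1 := fun h => hxv (Or.inr h)
        simp [List.foldl_cons, hj, hx, hx0, hx1]
    · intro s' i hi
      rw [PySem.List.mem_pyRange_one] at hi
      have h0 : (0 : Int) ≤ i := hi.1
      have h1 : i < (ys.length : Int) := hi.2
      have hgd : PySem.List.pyGetD (ys ++ [x]) i 2 = PySem.List.pyGetD ys i 2 := by
        rw [PySem.List.pyGetD_eq_getElem _ _ h0 (by simp; omega),
            PySem.List.pyGetD_eq_getElem _ _ h0 (by omega)]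
        exact List.getElem_append_left (by omega)
      rw [hgd]

-- ===== VERDICT =====
theorem calc_abgh_spec : Claim_equal_calc_abgh := by
  intro xi xj _ hpre
  unfold Spec_calc_abgh calc_abgh calc_abgh_alt
  rw [pv_loop_eq xi xj hpre]
  simp [PySem.List.count_eq, List.count_eq_countP]
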